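-- pv_equiv track=rewrite | github.com/aarneranta/python-course-gbg | summer-2021/QAs_Valter/QA 07-13/ovn.py | count_repeat_chars
-- ===== SOURCE A (Python) =====
-- def count_repeat_chars(string):
--     d = {}
--     for char in string:
--         if char not in d:
--             d[char] = 1
--         else:
--             d[char] += 1
--     count = 0
--     for key, value in d.items():
--         if value > 1:
--             count += 1
--     return count
-- ===== SOURCE B (Python) =====
-- def count_repeat_chars(string):
--     def go(chars):
--         if not chars:
--             return 0
--         head, tail = chars[0], chars[1:]
--         if head in tail:
--             return 1 + go([c for c in tail if c != head])
--         return go(tail)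
--     return go(list(string))
-- ===== Notes on version B (the rewrite author's own statement) =====
-- stated objective: alternative
-- what changed: Recursive peel-off algorithm: look at the first character, if it recurs in the rest count 1 and delete all its further occurrences, then recurse on the remainder - no frequency dict and no second pass over dict items.
import Mathlib
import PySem

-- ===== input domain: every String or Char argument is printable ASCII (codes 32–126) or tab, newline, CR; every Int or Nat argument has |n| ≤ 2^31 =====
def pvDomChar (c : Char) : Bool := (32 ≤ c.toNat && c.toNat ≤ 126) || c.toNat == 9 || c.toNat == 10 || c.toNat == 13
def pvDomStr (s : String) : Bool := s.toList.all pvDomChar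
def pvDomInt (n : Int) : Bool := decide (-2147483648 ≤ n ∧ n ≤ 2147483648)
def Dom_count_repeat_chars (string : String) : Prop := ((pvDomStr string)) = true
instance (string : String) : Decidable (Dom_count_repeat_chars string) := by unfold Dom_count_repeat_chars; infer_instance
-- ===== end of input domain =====

-- B replaces A's frequency dict plus a second pass over its items by a recursive
-- peel-off algorithm: if the first char recurs in the rest, count 1 and delete its
-- occurrences, then recurse; objective: alternative (no speed claim).

-- ===== PORT A =====
def count_repeat_chars (string : String) : Int :=
  let d := string.toList.foldl
    (fun d char =>
      if d.contains char = false then d.insert char 1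
      else d.modify char 0 (· + 1))
    (PySem.Dict.empty : PySem.Dict Char Int)
  d.items.foldl (fun count kv => if kv.2 > 1 then count + 1 else count) (0 : Int)

-- ===== PORT B =====
-- Source B's inner recursion 'go'
def goRepeat : List Char → Int
  | [] => 0
  | head :: tail =>
    if tail.contains head then 1 + goRepeat (tail.filter (fun c => c != head))
    else goRepeat tail
termination_by l => l.length
decreasing_by
  · simp only [List.length_unattach]
    exact Nat.lt_succ_of_le ((List.length_filter_le _ _).trans (by simp))
  · exact Nat.lt_succ_self _

def count_repeat_chars_alt (string : String) : Int := goRepeat string.toList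

-- ===== PRECONDITION & SPEC =====
def Spec_count_repeat_chars (string : String) (out : Int) : Prop := out = count_repeat_chars_alt string
instance (string : String) (out : Int) : Decidable (Spec_count_repeat_chars string out) := by unfold Spec_count_repeat_chars; infer_instance

-- ===== CLAIM (what is proved, stated in full; the proofs are below) =====
def Claim_equal_count_repeat_chars : Prop := ∀ (string : String), Dom_count_repeat_chars string → Spec_count_repeat_chars string (count_repeat_chars string)

-- ===== LEMMAS AND PROOFS =====

-- the set of characters repeated in l
def repSet (l : List Char) : Finset Char := l.toFinset.filter (fun c => 2 ≤ l.count c)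

lemma goRepeat_eq (l : List Char) : goRepeat l = (repSet l).card := by
  induction l using goRepeat.induct with
  | case1 => simp [goRepeat, repSet]
  | case2 head tail h ih =>
    simp only [List.unattach_filter, List.unattach_attach] at ih
    rw [goRepeat, if_pos h, ih]
    have hmem : head ∈ tail := by simpa using h
    have hset : repSet (head :: tail)
        = insert head (repSet (tail.filter (fun c => c != head))) := by
      ext d
      simp only [repSet, Finset.mem_filter, Finset.mem_insert, List.mem_toFinset,
        List.mem_cons, List.count_cons, List.mem_filter, bne_iff_ne]
      by_cases hd : d = head
      · subst hd
        have : 1 ≤ tail.count d := List.count_pos_iff.mpr hmem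
        simp [this]
      · have hd' : head ≠ d := Ne.symm hd
        simp [hd, hd']
    have hnot : head ∉ repSet (tail.filter (fun c => c != head)) := by
      simp [repSet]
    rw [hset, Finset.card_insert_of_notMem hnot]
    push_cast
    ring
  | case3 head tail h ih =>
    rw [goRepeat, if_neg h, ih]
    have hmem : head ∉ tail := by simpa using h
    have hset : repSet (head :: tail) = repSet tail := by
      ext d
      simp only [repSet, Finset.mem_filter, List.mem_toFinset, List.mem_cons,
        List.count_cons]
      by_cases hd : d = head
      · subst hd
        have : tail.count d = 0 := List.count_eq_zero.mpr hmem
        simp [this, hmem]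
      · have hd' : head ≠ d := Ne.symm hd
        simp [hd, hd']
    rw [hset]

-- A's dict loop body equals the Counter loop body
lemma dict_step (d : PySem.Dict Char Int) (c : Char) :
    (if d.contains c = false then d.insert c 1 else d.modify c 0 (· + 1))
      = d.modify c 0 (· + 1) := by
  split
  · next h =>
    have h0 : d.getD c 0 = 0 := PySem.Dict.getD_of_not_contains d 0 h
    simp [PySem.Dict.insert, PySem.Dict.modify, h, h0]
  · rfl

lemma A_dict_eq (l : List Char) :
    l.foldl (fun d char => if d.contains char = false then d.insert char 1
      else d.modify char 0 (· + 1)) (PySem.Dict.empty : PySem.Dict Char Int)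
      = PySem.Dict.counter l := by
  rw [PySem.Dict.counter_eq_foldl]
  congr 1
  funext d c
  exact dict_step d c

-- A's counting loop is the length of the filtered items
lemma foldl_count (l : List (Char × Int)) (n : Int) :
    l.foldl (fun count kv => if kv.2 > 1 then count + 1 else count) n
      = n + ((l.filter (fun kv => kv.2 > 1)).length : Int) := by
  induction l generalizing n with
  | nil => simp
  | cons kv t ih =>
    by_cases hkv : kv.2 > 1
    · simp only [List.foldl_cons, List.filter_cons, hkv, if_pos, decide_true, ih]
      simp only [List.length_cons]
      push_cast
      ring
    · simp [List.foldl_cons, hkv, ih]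

-- A's filtered distinct-char list counts exactly the repeated set
lemma A_filter_eq_repSet (l : List Char) :
    (((PySem.Set.ofList l).filter (fun c => ((l.count c : Int) > 1 : Bool))).length : Int)
      = (repSet l).card := by
  have hnd : ((PySem.Set.ofList l).filter (fun c => ((l.count c : Int) > 1 : Bool))).Nodup :=
    (PySem.Set.nodup_ofList l).filter _
  have hcard := List.toFinset_card_of_nodup hnd
  rw [← hcard]
  congr 2
  ext d
  simp only [repSet, List.mem_toFinset, List.mem_filter, PySem.Set.mem_ofList,
    Finset.mem_filter, decide_eq_true_eq]
  constructor
  · rintro ⟨hm, hc⟩; exact ⟨hm, by omega⟩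
  · rintro ⟨hm, hc⟩; exact ⟨hm, by exact_mod_cast by omega⟩

-- ===== VERDICT (by name: the statement is the Claim_ definition above) =====
theorem count_repeat_chars_spec : Claim_equal_count_repeat_chars := by
  intro s _
  unfold Spec_count_repeat_chars count_repeat_chars count_repeat_chars_alt
  simp only []
  rw [A_dict_eq s.toList, foldl_count, PySem.Dict.items_counter, zero_add, goRepeat_eq,
    List.filter_map, List.length_map]
  rw [← A_filter_eq_repSet s.toList]
  congr 2
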